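-- pv_equiv track=rewrite | github.com/jebreimo/Argen | Argen2/parser_tools.py | find_char
-- ===== SOURCE A (Python) =====
-- def find_unescaped_char(s, char, start_pos):
--     escape = False
--     for i in range(start_pos, len(s)):
--         if escape:
--             escape = False
--         elif s[i] == '\\':
--             escape = True
--         elif s[i] == char:
--             return i
--     return -1
--
-- def find_char(s, char, start_pos):
--     i = start_pos
--     while i < len(s):
--         if s[i] == char:
--             return i
--         if s[i] == "(":
--             i = find_char(s, ")", i + 1)
--         elif s[i] == "{":
--             i = find_char(s, "}", i + 1)
--         elif s[i] == "[":
--             i = find_char(s, "]", i + 1)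
--         elif s[i] == '"':
--             i = find_unescaped_char(s, '"', i + 1)
--         elif s[i] == "'":
--             if i + 2 < len(s) and s[i + 2] == "'":
--                 i += 2
--             elif i + 3 < len(s) and s[i] == "\\":
--                 i = find_unescaped_char(s, "'", i + 1)
--         if i == -1:
--             break
--         i += 1
--     return -1
-- ===== SOURCE B (Python) =====
-- def find_char(s, char, start_pos):
--     n = len(s)
--     pending = [char]
--     i = start_pos
--     while 0 <= i < n:
--         c = s[i]
--         if c == pending[-1]:
--             if len(pending) == 1:
--                 return i
--             pending.pop()
--         elif c in "({[":
--             pending.append({"(": ")", "{": "}", "[": "]"}[c])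
--         elif c == '"':
--             i += 1
--             escape = False
--             while i < n and (escape or s[i] != '"'):
--                 escape = (not escape) and s[i] == "\\"
--                 i += 1
--             if i >= n:
--                 return -1
--         elif c == "'" and i + 2 < n and s[i + 2] == "'":
--             i += 2
--         i += 1
--     return -1
-- ===== Notes on version B (the rewrite author's own statement) =====
-- stated objective: alternative
-- what changed: A's one-recursive-call-per-opening-bracket search (plus a find_unescaped_char helper) is replaced by a single non-recursive scan that keeps an explicit stack of pending closing targets (bottom = the searched char), popping on a match, pushing the matching closer on '(', '{', '[', and skipping quoted sections with an inlined escape-flag loop.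
-- outside the precondition, e.g. on find_char('abc', 'b', -2): A returns -2, B returns -1; on find_char('ab', 'a', -5): A raises IndexError, B returns -1
import Mathlib
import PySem

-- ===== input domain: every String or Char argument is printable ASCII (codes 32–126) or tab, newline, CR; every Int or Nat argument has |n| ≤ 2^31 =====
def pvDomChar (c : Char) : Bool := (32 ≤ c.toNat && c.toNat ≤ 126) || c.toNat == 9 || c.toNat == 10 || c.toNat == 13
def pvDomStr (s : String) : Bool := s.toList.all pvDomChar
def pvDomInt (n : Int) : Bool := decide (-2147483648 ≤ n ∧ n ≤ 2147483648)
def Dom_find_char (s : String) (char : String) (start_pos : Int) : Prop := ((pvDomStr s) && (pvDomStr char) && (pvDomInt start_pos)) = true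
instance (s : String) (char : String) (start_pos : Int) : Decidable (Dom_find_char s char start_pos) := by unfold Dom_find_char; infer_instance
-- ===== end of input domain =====

-- B replaces A's recursion (one recursive call per nested bracket, plus a helper for quoted
-- strings) by a single non-recursive scan that keeps an explicit stack of pending closing
-- targets and an inlined escape-flag loop for '"': objective 'alternative' (same O(n) cost).

-- ===== PORT A =====
-- helper of A: find_unescaped_char(s, char, start_pos), escape-flag scan.
-- A's loops recurse on a fuel argument (the remaining scan length, a pure totality device):
-- every step moves the position right by at least one, so the fuel never runs out first.
def pvUnescGo (l : List Char) (char : List Char) : Nat → Int → Bool → Int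
  | 0, _, _ => -1
  | fuel + 1, i, escape =>
    if i < (l.length : Int) then
      match PySem.List.pyGet? l i with
      | none => -1        -- IndexError in Python; unreachable under Pre_ (0 ≤ i)
      | some c =>
        if escape then pvUnescGo l char fuel (i + 1) false
        else if c = '\\' then pvUnescGo l char fuel (i + 1) true
        else if char = [c] then i
        else pvUnescGo l char fuel (i + 1) false
    else -1

def pvUnesc (l : List Char) (char : List Char) (i : Int) (escape : Bool) : Int :=
  pvUnescGo l char ((l.length : Int) - i).toNat i escape

-- port of A: while loop with one recursive find_char call per opening bracket;
-- 'i'' is the reassigned loop variable i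
def find_char_go (l : List Char) : Nat → List Char → Int → Int
  | 0, _, _ => -1
  | fuel + 1, char, i =>
    if i < (l.length : Int) then
      match PySem.List.pyGet? l i with
      | none => -1        -- IndexError in Python; unreachable under Pre_ (0 ≤ i)
      | some c =>
        if char = [c] then i
        else
          let i' :=
            if c = '(' then find_char_go l fuel [')'] (i + 1)
            else if c = '{' then find_char_go l fuel ['}'] (i + 1)
            else if c = '[' then find_char_go l fuel [']'] (i + 1)
            else if c = '"' then pvUnesc l ['"'] (i + 1) false
            else if c = '\'' then
              if i + 2 < (l.length : Int) ∧ PySem.List.pyGet? l (i + 2) = some '\'' then i + 2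
              else if i + 3 < (l.length : Int) ∧ c = '\\' then pvUnesc l ['\''] (i + 1) false
              else i
            else i
          if i' = -1 then -1
          else find_char_go l fuel char (i' + 1)
    else -1

def find_char (s : String) (char : String) (start_pos : Int) : Int :=
  find_char_go s.toList (((s.toList.length : Int) - start_pos).toNat) char.toList start_pos

-- ===== PORT B =====
-- B's dict literal {'(' : ')', '{' : '}', '[' : ']'} as a lookup
def pvCloser (c : Char) : Char := if c = '(' then ')' else if c = '{' then '}' else ']'

-- B's inlined escape-flag inner loop: consume characters while (escape or char ≠ '"');
-- on success return the suffix after the closing quote together with its absolute index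
def pvScanQuote : List Char → Nat → Bool → Option (List Char × Nat)
  | [], _, _ => none
  | c :: rest, i, escape =>
    if escape = false ∧ c = '"' then some (rest, i + 1)
    else pvScanQuote rest (i + 1) (!escape && decide (c = '\\'))

theorem pvScanQuote_suffix_le : ∀ (l : List Char) (i : Nat) (e : Bool) (l' : List Char) (j : Nat),
    pvScanQuote l i e = some (l', j) → l'.length ≤ l.length := by
  intro l
  induction l with
  | nil => intro i e l' j h; simp [pvScanQuote] at h
  | cons c rest ih =>
      intro i e l' j h
      rw [pvScanQuote] at h
      split_ifs at h with h1
      · simp only [Option.some.injEq, Prod.mk.injEq] at h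
        simp [← h.1]
      · have := ih (i + 1) (!e && decide (c = '\\')) l' j h
        simp; omega

-- B's single while loop, as the structural recursion on the remaining suffix of the string
-- (the Nat argument is the current absolute index i; 'pending' is the stack, top first)
def find_char_alt_go : List Char → Nat → List (List Char) → Int
  | [], _, _ => -1
  | c :: rest, i, pending =>
    match pending with
    | [] => -1        -- unreachable: the stack starts nonempty and is never fully popped
    | t :: ps =>
      if t = [c] then
        if ps = [] then (i : Int) else find_char_alt_go rest (i + 1) ps
      else if c = '(' ∨ c = '{' ∨ c = '[' then
        find_char_alt_go rest (i + 1) ([pvCloser c] :: t :: ps)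
      else if c = '"' then
        match h : pvScanQuote rest (i + 1) false with
        | none => -1
        | some (suf, j) => find_char_alt_go suf j (t :: ps)
      else if c = '\'' ∧ rest[1]? = some '\'' then
        find_char_alt_go (rest.drop 2) (i + 3) (t :: ps)
      else find_char_alt_go rest (i + 1) (t :: ps)
  termination_by l _ _ => l.length
  decreasing_by
  all_goals simp [List.length_drop]
  all_goals try (have := pvScanQuote_suffix_le rest (i + 1) false suf j h)
  all_goals omega

def find_char_alt (s : String) (char : String) (start_pos : Int) : Int :=
  if start_pos < 0 then -1
  else find_char_alt_go (s.toList.drop start_pos.toNat) start_pos.toNat [char.toList]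

-- ===== PRECONDITION & SPEC =====
-- Pre_ restricts to nonnegative start_pos, the function's natural domain: for start_pos < -len(s)
-- A raises IndexError, and for -len(s) ≤ start_pos < 0 Python's negative indexing makes A scan from
-- the string's end — an accident of the implementation in which a bracket closed at index -1 is
-- even conflated with the -1 failure sentinel.
def Pre_find_char (s : String) (char : String) (start_pos : Int) : Prop := 0 ≤ start_pos
instance (s : String) (char : String) (start_pos : Int) : Decidable (Pre_find_char s char start_pos) := by
  unfold Pre_find_char; infer_instance

def pvWitness_find_char : String × String × Int := ("a(b)c{d}e", "e", 0)

def Spec_find_char (s : String) (char : String) (start_pos : Int) (out : Int) : Prop := out = find_char_alt s char start_pos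
instance (s : String) (char : String) (start_pos : Int) (out : Int) : Decidable (Spec_find_char s char start_pos out) := by unfold Spec_find_char; infer_instance

-- ===== CLAIM (what is proved, stated in full; the proofs are below) =====
def Claim_equal_find_char : Prop := ∀ (s : String) (char : String) (start_pos : Int), Dom_find_char s char start_pos → Pre_find_char s char start_pos → Spec_find_char s char start_pos (find_char s char start_pos)

-- ===== LEMMAS AND PROOFS =====

-- proof-only intermediate machine: B's stack scan re-indexed like A (fuel + Int position);
-- it is related to A by 'key' below and to B's suffix recursion by 'alt_go_eq_stackGo'
def stackGo (l : List Char) : Nat → List (List Char) → Int → Int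
  | 0, _, _ => -1
  | fuel + 1, stk, i =>
    if i < (l.length : Int) then
      match PySem.List.pyGet? l i with
      | none => -1
      | some c =>
        match stk with
        | [] => -1
        | t :: rest =>
          if t = [c] then
            if rest = [] then i else stackGo l fuel rest (i + 1)
          else if c = '(' then stackGo l fuel ([')'] :: t :: rest) (i + 1)
          else if c = '{' then stackGo l fuel (['}'] :: t :: rest) (i + 1)
          else if c = '[' then stackGo l fuel ([']'] :: t :: rest) (i + 1)
          else if c = '"' then
            let j := pvUnesc l ['"'] (i + 1) false
            if j = -1 then -1
            else stackGo l fuel (t :: rest) (j + 1)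
          else if c = '\'' then
            if i + 2 < (l.length : Int) ∧ PySem.List.pyGet? l (i + 2) = some '\'' then
              stackGo l fuel (t :: rest) (i + 3)
            else stackGo l fuel (t :: rest) (i + 1)
          else stackGo l fuel (t :: rest) (i + 1)
    else -1

-- find_unescaped_char never returns an index below its start position
theorem pvUnescGo_ge (l : List Char) (char : List Char) :
    ∀ (f : Nat) (i : Int) (e : Bool), pvUnescGo l char f i e ≠ -1 → i ≤ pvUnescGo l char f i e := by
  intro f
  induction f with
  | zero => intro i e h; simp [pvUnescGo] at h
  | succ f ih =>
      intro i e h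
      rw [pvUnescGo] at h ⊢
      by_cases hlt : i < (l.length : Int)
      · simp only [hlt, if_pos] at h ⊢
        cases hc : PySem.List.pyGet? l i with
        | none => simp [hc] at h
        | some c =>
          simp only [hc] at h ⊢
          split_ifs at h ⊢ with h1 h2 h3
          · have := ih (i + 1) false h; omega
          · have := ih (i + 1) true h; omega
          · omega
          · have := ih (i + 1) false h; omega
      · simp [hlt] at h

theorem pvUnesc_ge (l : List Char) (char : List Char) (i : Int) (escape : Bool)
    (h : pvUnesc l char i escape ≠ -1) : i ≤ pvUnesc l char i escape :=
  pvUnescGo_ge l char (((l.length : Int) - i).toNat) i escape h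

-- and never returns an index at or past the end of the string
theorem pvUnescGo_lt (l : List Char) (char : List Char) :
    ∀ (f : Nat) (i : Int) (e : Bool), pvUnescGo l char f i e ≠ -1 →
      pvUnescGo l char f i e < (l.length : Int) := by
  intro f
  induction f with
  | zero => intro i e h; simp [pvUnescGo] at h
  | succ f ih =>
      intro i e h
      rw [pvUnescGo] at h ⊢
      by_cases hlt : i < (l.length : Int)
      · simp only [hlt, if_pos] at h ⊢
        cases hc : PySem.List.pyGet? l i with
        | none => simp [hc] at h
        | some c =>
          simp only [hc] at h ⊢
          split_ifs at h ⊢ with h1 h2 h3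
          · exact ih (i + 1) false h
          · exact ih (i + 1) true h
          · exact hlt
          · exact ih (i + 1) false h
      · simp [hlt] at h

theorem pvUnesc_lt (l : List Char) (char : List Char) (i : Int) (escape : Bool)
    (h : pvUnesc l char i escape ≠ -1) : pvUnesc l char i escape < (l.length : Int) :=
  pvUnescGo_lt l char (((l.length : Int) - i).toNat) i escape h

-- A's find_char never returns an index below its start position
theorem find_char_go_ge (l : List Char) :
    ∀ (f : Nat) (char : List Char) (i : Int),
      find_char_go l f char i ≠ -1 → i ≤ find_char_go l f char i := by
  intro f
  induction f with
  | zero => intro char i h; simp [find_char_go] at h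
  | succ f ih =>
      intro char i h
      rw [find_char_go] at h ⊢
      by_cases hlt : i < (l.length : Int)
      · simp only [hlt, if_pos] at h ⊢
        cases hc : PySem.List.pyGet? l i with
        | none => simp [hc] at h
        | some c =>
          simp only [hc] at h ⊢
          by_cases hm : char = [c]
          · simp [hm]
          · simp only [hm, ite_false] at h ⊢
            generalize hi' : (if c = '(' then find_char_go l f [')'] (i + 1)
              else if c = '{' then find_char_go l f ['}'] (i + 1)
              else if c = '[' then find_char_go l f [']'] (i + 1)
              else if c = '"' then pvUnesc l ['"'] (i + 1) false
              else if c = '\'' then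
                if i + 2 < (l.length : Int) ∧ PySem.List.pyGet? l (i + 2) = some '\'' then i + 2
                else if i + 3 < (l.length : Int) ∧ c = '\\' then pvUnesc l ['\''] (i + 1) false
                else i
              else i) = i' at h ⊢
            have hi'ge : i' = -1 ∨ i ≤ i' := by
              rw [← hi']
              split_ifs with h1 h2 h3 h4 h5 h6 h7
              · by_cases hz : find_char_go l f [')'] (i + 1) = -1
                · exact Or.inl hz
                · exact Or.inr (by have := ih [')'] (i + 1) hz; omega)
              · by_cases hz : find_char_go l f ['}'] (i + 1) = -1
                · exact Or.inl hz
                · exact Or.inr (by have := ih ['}'] (i + 1) hz; omega)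
              · by_cases hz : find_char_go l f [']'] (i + 1) = -1
                · exact Or.inl hz
                · exact Or.inr (by have := ih [']'] (i + 1) hz; omega)
              · by_cases hz : pvUnesc l ['"'] (i + 1) false = -1
                · exact Or.inl hz
                · exact Or.inr (by have := pvUnesc_ge l ['"'] (i + 1) false hz; omega)
              · exact Or.inr (by omega)
              · by_cases hz : pvUnesc l ['\''] (i + 1) false = -1
                · exact Or.inl hz
                · exact Or.inr (by have := pvUnesc_ge l ['\''] (i + 1) false hz; omega)
              · exact Or.inr le_rfl
              · exact Or.inr le_rfl
            split_ifs at h ⊢ with h1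
            · exact absurd rfl h
            · rcases hi'ge with hz | hge
              · exact absurd hz h1
              · have := ih char (i' + 1) h
                omega
      · simp [hlt] at h

-- ends of the scan: with the position past the end both machines return -1 whatever the fuel
theorem find_char_go_out (l : List Char) (f : Nat) (char : List Char) (i : Int)
    (h : ¬ i < (l.length : Int)) : find_char_go l f char i = -1 := by
  cases f with
  | zero => simp [find_char_go]
  | succ f => rw [find_char_go]; simp [h]

theorem stackGo_out (l : List Char) (f : Nat) (stk : List (List Char)) (i : Int)
    (h : ¬ i < (l.length : Int)) : stackGo l f stk i = -1 := by
  cases f with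
  | zero => simp [stackGo]
  | succ f => rw [stackGo]; simp [h]

-- fuel irrelevance for the stack scan
theorem stackGo_irrel (l : List Char) :
    ∀ (f1 f2 : Nat) (stk : List (List Char)) (i : Int),
      ((l.length : Int) - i).toNat ≤ f1 → ((l.length : Int) - i).toNat ≤ f2 →
      stackGo l f1 stk i = stackGo l f2 stk i := by
  intro f1
  induction f1 with
  | zero =>
      intro f2 stk i h1 h2
      have hlt : ¬ i < (l.length : Int) := by omega
      rw [stackGo_out l 0 stk i hlt, stackGo_out l f2 stk i hlt]
  | succ f1 ih =>
      intro f2 stk i h1 h2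
      by_cases hlt : i < (l.length : Int)
      · obtain ⟨f2', rfl⟩ : ∃ f2', f2 = f2' + 1 := ⟨f2 - 1, by omega⟩
        rw [stackGo, stackGo]
        simp only [hlt, if_pos]
        cases hc : PySem.List.pyGet? l i with
        | none => rfl
        | some c =>
          cases stk with
          | nil => rfl
          | cons t rest =>
            simp only []
            by_cases hm : t = [c]
            · by_cases hr : rest = [] <;>
                simp [hm, hr, ih f2' rest (i + 1) (by omega) (by omega)]
            · simp only [hm, ite_false]
              by_cases h1' : c = '('
              · simp only [h1', if_pos]
                exact ih f2' _ (i + 1) (by omega) (by omega)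
              · by_cases h2' : c = '{'
                · simp only [h1', ite_false, h2', if_pos]
                  exact ih f2' _ (i + 1) (by omega) (by omega)
                · by_cases h3' : c = '['
                  · simp only [h1', h2', ite_false, h3', if_pos]
                    exact ih f2' _ (i + 1) (by omega) (by omega)
                  · by_cases h4' : c = '"'
                    · simp only [h1', h2', h3', ite_false, h4', if_pos]
                      by_cases hz : pvUnesc l ['"'] (i + 1) false = -1
                      · simp [hz]
                      · have := pvUnesc_ge l ['"'] (i + 1) false hz
                        simp only [hz, ite_false]
                        exact ih f2' _ (pvUnesc l ['"'] (i + 1) false + 1) (by omega) (by omega)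
                    · by_cases h5' : c = '\''
                      · simp only [h1', h2', h3', h4', ite_false, h5', if_pos]
                        by_cases h6' : i + 2 < (l.length : Int) ∧ PySem.List.pyGet? l (i + 2) = some '\''
                        · simp only [h6', if_pos]
                          exact ih f2' _ (i + 3) (by omega) (by omega)
                        · simp only [h6', ite_false]
                          exact ih f2' _ (i + 1) (by omega) (by omega)
                      · simp only [h1', h2', h3', h4', h5', ite_false]
                        exact ih f2' _ (i + 1) (by omega) (by omega)
      · rw [stackGo_out l _ stk i hlt, stackGo_out l f2 stk i hlt]

-- the loop/stack correspondence: the stack scan with stack (t :: rest) behaves like A's search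
-- for t, followed (on success, if the stack is deeper) by the scan of the remaining stack
theorem key (l : List Char) : ∀ (f : Nat) (i : Int) (t : List Char) (rest : List (List Char)),
    ((l.length : Int) - i).toNat ≤ f → 0 ≤ i →
    stackGo l f (t :: rest) i =
      (if find_char_go l f t i = -1 then -1
       else if rest = [] then find_char_go l f t i
       else stackGo l f rest (find_char_go l f t i + 1)) := by
  intro f
  induction f with
  | zero =>
      intro i t rest hf hi
      simp [stackGo, find_char_go]
  | succ f ih =>
      intro i t rest hf hi
      by_cases hlt : i < (l.length : Int)
      case neg =>
        rw [find_char_go_out l _ t i hlt, stackGo_out l _ (t :: rest) i hlt]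
        simp
      cases hc : PySem.List.pyGet? l i with
      | none => rw [stackGo, find_char_go]; simp [hlt, hc]
      | some c =>
        by_cases hm : t = [c]
        · rw [stackGo, find_char_go]
          have hne : ¬ i = -1 := by omega
          have hirr : ∀ rest' : List (List Char),
              stackGo l f rest' (i + 1) = stackGo l (f + 1) rest' (i + 1) :=
            fun rest' => stackGo_irrel l f (f + 1) rest' (i + 1) (by omega) (by omega)
          by_cases hr : rest = []
          · simp [hlt, hc, hm, hne, hr]
          · simp [hlt, hc, hm, hne, hr, hirr]
        · by_cases hp : c = '('
          · subst hp
            have IH1 := ih (i + 1) [')'] (t :: rest) (by omega) (by omega)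
            by_cases hj1 : find_char_go l f [')'] (i + 1) = -1
            · rw [stackGo, find_char_go]
              simp [hlt, hc, hm, hj1, IH1]
            · have hge := find_char_go_ge l f [')'] (i + 1) hj1
              have IH2 := ih (find_char_go l f [')'] (i + 1) + 1) t rest (by omega) (by omega)
              by_cases hF : find_char_go l f t (find_char_go l f [')'] (i + 1) + 1) = -1
              · rw [stackGo, find_char_go]
                simp [hlt, hc, hm, hj1, IH1, IH2, hF]
              · have hgeF := find_char_go_ge l f t (find_char_go l f [')'] (i + 1) + 1) hF
                have hirr : stackGo l f rest
                      (find_char_go l f t (find_char_go l f [')'] (i + 1) + 1) + 1)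
                    = stackGo l (f + 1) rest
                      (find_char_go l f t (find_char_go l f [')'] (i + 1) + 1) + 1) :=
                  stackGo_irrel l f (f + 1) rest _ (by omega) (by omega)
                rw [stackGo, find_char_go]
                simp [hlt, hc, hm, hj1, IH1, IH2, hF, hirr]
          · by_cases hb : c = '{'
            · subst hb
              have IH1 := ih (i + 1) ['}'] (t :: rest) (by omega) (by omega)
              by_cases hj1 : find_char_go l f ['}'] (i + 1) = -1
              · rw [stackGo, find_char_go]
                simp [hlt, hc, hm, hp, hj1, IH1]
              · have hge := find_char_go_ge l f ['}'] (i + 1) hj1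
                have IH2 := ih (find_char_go l f ['}'] (i + 1) + 1) t rest (by omega) (by omega)
                by_cases hF : find_char_go l f t (find_char_go l f ['}'] (i + 1) + 1) = -1
                · rw [stackGo, find_char_go]
                  simp [hlt, hc, hm, hp, hj1, IH1, IH2, hF]
                · have hgeF := find_char_go_ge l f t (find_char_go l f ['}'] (i + 1) + 1) hF
                  have hirr : stackGo l f rest
                        (find_char_go l f t (find_char_go l f ['}'] (i + 1) + 1) + 1)
                      = stackGo l (f + 1) rest
                        (find_char_go l f t (find_char_go l f ['}'] (i + 1) + 1) + 1) :=
                    stackGo_irrel l f (f + 1) rest _ (by omega) (by omega)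
                  rw [stackGo, find_char_go]
                  simp [hlt, hc, hm, hp, hj1, IH1, IH2, hF, hirr]
            · by_cases hk : c = '['
              · subst hk
                have IH1 := ih (i + 1) [']'] (t :: rest) (by omega) (by omega)
                by_cases hj1 : find_char_go l f [']'] (i + 1) = -1
                · rw [stackGo, find_char_go]
                  simp [hlt, hc, hm, hp, hb, hj1, IH1]
                · have hge := find_char_go_ge l f [']'] (i + 1) hj1
                  have IH2 := ih (find_char_go l f [']'] (i + 1) + 1) t rest (by omega) (by omega)
                  by_cases hF : find_char_go l f t (find_char_go l f [']'] (i + 1) + 1) = -1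
                  · rw [stackGo, find_char_go]
                    simp [hlt, hc, hm, hp, hb, hj1, IH1, IH2, hF]
                  · have hgeF := find_char_go_ge l f t (find_char_go l f [']'] (i + 1) + 1) hF
                    have hirr : stackGo l f rest
                          (find_char_go l f t (find_char_go l f [']'] (i + 1) + 1) + 1)
                        = stackGo l (f + 1) rest
                          (find_char_go l f t (find_char_go l f [']'] (i + 1) + 1) + 1) :=
                      stackGo_irrel l f (f + 1) rest _ (by omega) (by omega)
                    rw [stackGo, find_char_go]
                    simp [hlt, hc, hm, hp, hb, hj1, IH1, IH2, hF, hirr]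
              · by_cases hq : c = '"'
                · subst hq
                  by_cases hj1 : pvUnesc l ['"'] (i + 1) false = -1
                  · rw [stackGo, find_char_go]
                    simp [hlt, hc, hm, hp, hb, hk, hj1]
                  · have hge := pvUnesc_ge l ['"'] (i + 1) false hj1
                    have IH2 := ih (pvUnesc l ['"'] (i + 1) false + 1) t rest (by omega) (by omega)
                    by_cases hF : find_char_go l f t (pvUnesc l ['"'] (i + 1) false + 1) = -1
                    · rw [stackGo, find_char_go]
                      simp [hlt, hc, hm, hp, hb, hk, hj1, IH2, hF]
                    · have hgeF := find_char_go_ge l f t (pvUnesc l ['"'] (i + 1) false + 1) hF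
                      have hirr : stackGo l f rest
                            (find_char_go l f t (pvUnesc l ['"'] (i + 1) false + 1) + 1)
                          = stackGo l (f + 1) rest
                            (find_char_go l f t (pvUnesc l ['"'] (i + 1) false + 1) + 1) :=
                        stackGo_irrel l f (f + 1) rest _ (by omega) (by omega)
                      rw [stackGo, find_char_go]
                      simp [hlt, hc, hm, hp, hb, hk, hj1, IH2, hF, hirr]
                · by_cases hs : c = '\''
                  · subst hs
                    by_cases h2 : i + 2 < (l.length : Int) ∧ PySem.List.pyGet? l (i + 2) = some '\''
                    · have IH3 := ih (i + 3) t rest (by omega) (by omega)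
                      have e1 : ¬ ((i : Int) + 2 = -1) := by omega
                      have e3 : (i : Int) + 2 + 1 = i + 3 := by ring
                      by_cases hF : find_char_go l f t (i + 3) = -1
                      · rw [stackGo, find_char_go]
                        simp [hlt, hc, hm, hp, hb, hk, hq, h2, e1, e3, IH3, hF]
                      · have hgeF := find_char_go_ge l f t (i + 3) hF
                        have hirr : stackGo l f rest (find_char_go l f t (i + 3) + 1)
                            = stackGo l (f + 1) rest (find_char_go l f t (i + 3) + 1) :=
                          stackGo_irrel l f (f + 1) rest _ (by omega) (by omega)
                        rw [stackGo, find_char_go]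
                        simp [hlt, hc, hm, hp, hb, hk, hq, h2, e1, e3, IH3, hF, hirr]
                    · have IH1 := ih (i + 1) t rest (by omega) (by omega)
                      have e1 : ¬ (i = -1) := by omega
                      by_cases hF : find_char_go l f t (i + 1) = -1
                      · rw [stackGo, find_char_go]
                        simp [hlt, hc, hm, hp, hb, hk, hq, h2, e1, IH1, hF]
                      · have hgeF := find_char_go_ge l f t (i + 1) hF
                        have hirr : stackGo l f rest (find_char_go l f t (i + 1) + 1)
                            = stackGo l (f + 1) rest (find_char_go l f t (i + 1) + 1) :=
                          stackGo_irrel l f (f + 1) rest _ (by omega) (by omega)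
                        rw [stackGo, find_char_go]
                        simp [hlt, hc, hm, hp, hb, hk, hq, h2, e1, IH1, hF, hirr]
                  · have IH1 := ih (i + 1) t rest (by omega) (by omega)
                    have e1 : ¬ (i = -1) := by omega
                    by_cases hF : find_char_go l f t (i + 1) = -1
                    · rw [stackGo, find_char_go]
                      simp [hlt, hc, hm, hp, hb, hk, hq, hs, e1, IH1, hF]
                    · have hgeF := find_char_go_ge l f t (i + 1) hF
                      have hirr : stackGo l f rest (find_char_go l f t (i + 1) + 1)
                          = stackGo l (f + 1) rest (find_char_go l f t (i + 1) + 1) :=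
                        stackGo_irrel l f (f + 1) rest _ (by omega) (by omega)
                      rw [stackGo, find_char_go]
                      simp [hlt, hc, hm, hp, hb, hk, hq, hs, e1, IH1, hF, hirr]

-- B's inlined escape loop computes exactly A's find_unescaped_char for '"'
theorem scanQuote_aux (l : List Char) : ∀ (m k : Nat) (e : Bool), k ≤ l.length → l.length - k = m →
    pvScanQuote (l.drop k) k e =
      (if pvUnescGo l ['"'] m (k : Int) e = -1 then none
       else some (l.drop ((pvUnescGo l ['"'] m (k : Int) e).toNat + 1),
                  (pvUnescGo l ['"'] m (k : Int) e).toNat + 1)) := by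
  intro m
  induction m with
  | zero =>
      intro k e hk hm
      have hk' : k = l.length := by omega
      subst hk'
      simp [List.drop_length, pvScanQuote, pvUnescGo]
  | succ m ih =>
      intro k e hk hm
      have hklt : k < l.length := by omega
      rw [List.drop_eq_getElem_cons hklt, pvScanQuote, pvUnescGo]
      have hlt : (k : Int) < (l.length : Int) := by exact_mod_cast hklt
      have hget : PySem.List.pyGet? l (k : Int) = some l[k] := by
        simp [List.getElem?_eq_getElem hklt]
      have hcast : (k : Int) + 1 = ((k + 1 : Nat) : Int) := by push_cast; ring
      have IH : ∀ e', pvScanQuote (l.drop (k + 1)) (k + 1) e' =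
          (if pvUnescGo l ['"'] m ((k : Int) + 1) e' = -1 then none
           else some (l.drop ((pvUnescGo l ['"'] m ((k : Int) + 1) e').toNat + 1),
                      (pvUnescGo l ['"'] m ((k : Int) + 1) e').toNat + 1)) := by
        intro e'
        rw [hcast]
        exact ih (k + 1) e' (by omega) (by omega)
      simp only [hlt, if_pos, hget]
      cases e with
      | true => simp [IH false]
      | false =>
          by_cases hq : l[k] = '"'
          · have hkk : ¬ ((k : Int) = -1) := by omega
            simp [hq, hkk]
          · by_cases hb : l[k] = '\\'
            · simp [hq, hb, IH true]
            · have hne : ¬ (['"'] = [l[k]]) := by simp [Ne.symm hq]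
              simp [hq, hb, hne, IH false]

theorem scanQuote_eq_unesc (l : List Char) : ∀ (k : Nat) (e : Bool), k ≤ l.length →
    pvScanQuote (l.drop k) k e =
      (if pvUnesc l ['"'] (k : Int) e = -1 then none
       else some (l.drop ((pvUnesc l ['"'] (k : Int) e).toNat + 1),
                  (pvUnesc l ['"'] (k : Int) e).toNat + 1)) := by
  intro k e hk
  have hfuel : (((l.length : Int) - (k : Int)).toNat) = l.length - k := by omega
  unfold pvUnesc
  rw [hfuel]
  exact scanQuote_aux l (l.length - k) k e hk rfl

-- B's suffix recursion computes exactly the stack scan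
theorem alt_aux (l : List Char) : ∀ (m k : Nat) (stk : List (List Char)), l.length - k ≤ m →
    find_char_alt_go (l.drop k) k stk = stackGo l (l.length - k) stk (k : Int) := by
  intro m
  induction m with
  | zero =>
      intro k stk hm
      have hk : l.length ≤ k := by omega
      have h0 : l.length - k = 0 := by omega
      rw [List.drop_of_length_le hk, h0]
      simp [find_char_alt_go, stackGo]
  | succ m ih =>
      intro k stk hm
      by_cases hklt : k < l.length
      case neg =>
        have hk : l.length ≤ k := by omega
        have h0 : l.length - k = 0 := by omega
        rw [List.drop_of_length_le hk, h0]
        simp [find_char_alt_go, stackGo]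
      obtain ⟨f, hf⟩ : ∃ f, l.length - k = f + 1 := ⟨l.length - (k + 1), by omega⟩
      have hf1 : l.length - (k + 1) = f := by omega
      have hlt : (k : Int) < (l.length : Int) := by exact_mod_cast hklt
      have hget : PySem.List.pyGet? l (k : Int) = some l[k] := by
        simp [List.getElem?_eq_getElem hklt]
      have hcast1 : (k : Int) + 1 = ((k + 1 : Nat) : Int) := by push_cast; ring
      rw [List.drop_eq_getElem_cons hklt, hf, find_char_alt_go.eq_def, stackGo]
      simp only [hlt, if_pos, hget]
      cases stk with
      | nil => rfl
      | cons t ps =>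
        simp only []
        by_cases hmch : t = [l[k]]
        · by_cases hps : ps = []
          · simp [hmch, hps]
          · have := ih (k + 1) ps (by omega)
            rw [hf1, ← hcast1] at this
            simp [hmch, hps, this]
        · by_cases h1 : l[k] = '('
          · rw [h1] at hmch
            have := ih (k + 1) ([')'] :: t :: ps) (by omega)
            rw [hf1, ← hcast1] at this
            simp [hmch, h1, pvCloser, this]
          · by_cases h2 : l[k] = '{'
            · rw [h2] at hmch
              have := ih (k + 1) (['}'] :: t :: ps) (by omega)
              rw [hf1, ← hcast1] at this
              simp [hmch, h1, h2, pvCloser, this]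
            · by_cases h3 : l[k] = '['
              · rw [h3] at hmch
                have := ih (k + 1) ([']'] :: t :: ps) (by omega)
                rw [hf1, ← hcast1] at this
                simp [hmch, h1, h2, h3, pvCloser, this]
              · by_cases h4 : l[k] = '"'
                · rw [h4] at hmch
                  have hq := scanQuote_eq_unesc l (k + 1) false (by omega)
                  rw [← hcast1] at hq
                  by_cases hz : pvUnesc l ['"'] ((k : Int) + 1) false = -1
                  · rw [if_pos hz] at hq
                    simp [hmch, h1, h2, h3, h4, hz]
                    split
                    · rfl
                    · rename_i suf j0 heq
                      rw [hq] at heq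
                      cases heq
                  · rw [if_neg hz] at hq
                    have hge := pvUnesc_ge l ['"'] ((k : Int) + 1) false hz
                    have hl2 := pvUnesc_lt l ['"'] ((k : Int) + 1) false hz
                    set j := pvUnesc l ['"'] ((k : Int) + 1) false with hj
                    have := ih (j.toNat + 1) (t :: ps) (by omega)
                    have hjc : ((j.toNat + 1 : Nat) : Int) = j + 1 := by omega
                    rw [hjc] at this
                    have hirr := stackGo_irrel l (l.length - (j.toNat + 1)) f (t :: ps) (j + 1)
                      (by omega) (by omega)
                    simp [hmch, h1, h2, h3, h4, hz]
                    split
                    · rename_i heq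
                      rw [hq] at heq
                      cases heq
                    · rename_i suf j0 heq
                      rw [hq] at heq
                      injection heq with heq1
                      injection heq1 with hsuf hj0
                      subst hsuf
                      subst hj0
                      rw [this, hirr]
                · by_cases h5 : l[k] = '\''
                  · rw [h5] at hmch
                    by_cases h6 : (l.drop (k + 1))[1]? = some '\''
                    · have h6' : l[k + 2]? = some '\'' := by
                        rw [← h6, List.getElem?_drop]
                      obtain ⟨hlen2, -⟩ := List.getElem?_eq_some_iff.mp h6'
                      have hc2 : ((k : Int) + 2) = ((k + 2 : Nat) : Int) := by push_cast; ring
                      have hcond : (k : Int) + 2 < (l.length : Int) ∧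
                          PySem.List.pyGet? l ((k : Int) + 2) = some '\'' := by
                        constructor
                        · exact_mod_cast hlen2
                        · rw [hc2, PySem.List.pyGet?_natCast]
                          exact h6'
                      have hd3 : (l.drop (k + 1)).drop 2 = l.drop (k + 3) := by
                        rw [List.drop_drop, show k + 1 + 2 = k + 3 from by omega]
                      have := ih (k + 3) (t :: ps) (by omega)
                      have hc3 : ((k + 3 : Nat) : Int) = (k : Int) + 2 + 1 := by push_cast; ring
                      rw [hc3] at this
                      have hne2 : ¬ ((k : Int) + 2 = -1) := by omega
                      have hirr := stackGo_irrel l (l.length - (k + 3)) f (t :: ps) ((k : Int) + 2 + 1)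
                        (by omega) (by omega)
                      have hc4 : (k : Int) + 2 + 1 = (k : Int) + 3 := by ring
                      rw [hc4] at this hirr
                      simp [hmch, h1, h2, h3, h4, h5, h6, hcond, hd3, hne2, this, hirr]
                    · have hcond : ¬ ((k : Int) + 2 < (l.length : Int) ∧
                          PySem.List.pyGet? l ((k : Int) + 2) = some '\'') := by
                        rintro ⟨ha, hb⟩
                        apply h6
                        have hc2 : ((k : Int) + 2) = ((k + 2 : Nat) : Int) := by push_cast; ring
                        rw [hc2, PySem.List.pyGet?_natCast] at hb
                        rw [List.getElem?_drop, show k + 1 + 1 = k + 2 from by omega]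
                        exact hb
                      have h6n : ¬ l[k + 1 + 1]? = some '\'' := by
                        rw [← List.getElem?_drop]
                        exact h6
                      have := ih (k + 1) (t :: ps) (by omega)
                      rw [hf1, ← hcast1] at this
                      have hnek : ¬ ((k : Int) = -1) := by omega
                      simp [hmch, h1, h2, h3, h4, h5, h6n, hcond, hnek, this]
                  · have := ih (k + 1) (t :: ps) (by omega)
                    rw [hf1, ← hcast1] at this
                    simp [hmch, h1, h2, h3, h4, h5, this]

theorem alt_go_eq_stackGo (l : List Char) : ∀ (k : Nat) (stk : List (List Char)),
    find_char_alt_go (l.drop k) k stk = stackGo l (l.length - k) stk (k : Int) := by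
  intro k stk
  exact alt_aux l (l.length - k) k stk le_rfl

-- ===== VERDICT (by name: the statement is the Claim_ definition above) =====
theorem find_char_spec : Claim_equal_find_char := by
  intro s char start_pos _hdom hpre
  unfold Pre_find_char at hpre
  unfold Spec_find_char find_char find_char_alt
  rw [if_neg (by omega)]
  have hnat : ((start_pos.toNat : Nat) : Int) = start_pos := Int.toNat_of_nonneg hpre
  rw [alt_go_eq_stackGo s.toList start_pos.toNat [char.toList], hnat]
  have hfuel : s.toList.length - start_pos.toNat = ((s.toList.length : Int) - start_pos).toNat := by
    omega
  rw [hfuel]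
  rw [key s.toList (((s.toList.length : Int) - start_pos).toNat) start_pos char.toList []
      (le_refl _) hpre]
  by_cases h : find_char_go s.toList (((s.toList.length : Int) - start_pos).toNat)
      char.toList start_pos = -1
  · simp [h]
  · simp [h]
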